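-- pv_equiv track=rewrite | github.com/LukeAWarren/adventofcode | 2024/aoc_day_02_part_1.py | check_level_increase
-- ===== SOURCE A (Python) =====
-- INCREASING = 1
--
-- NO_CHANGE = 0
--
-- DECREASING = -1
--
-- def check_direction(previous_level, current_level):
--     if (previous_level - current_level) == 0:
--         return NO_CHANGE
--     if (previous_level - current_level) > 0:
--         return DECREASING
--     if (previous_level - current_level) < 0:
--         return INCREASING
--
-- def check_level_increase(report):
--     previous_level = None
--     previous_direction = None
--     for current_level in report:
--         if previous_level != None:
--             if abs(previous_level - current_level) > 3:
--                 return False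
--             current_direction = check_direction(previous_level, current_level)
--             if previous_direction != None:
--                 # check that the levels are consistently changing
--                 if (current_direction == NO_CHANGE):
--                     return False
--                 if (previous_direction != current_direction):
--                     return False
--             previous_direction = current_direction
--         previous_level = current_level
--     return True
-- ===== SOURCE B (Python) =====
-- def check_level_increase(report):
--     diffs = [b - a for a, b in zip(report, report[1:])]
--     if any(abs(d) > 3 for d in diffs):
--         return False
--     return all(d > 0 for d in diffs) or all(d < 0 for d in diffs)
-- ===== Notes on version B (the rewrite author's own statement) =====
-- stated objective: simpler
-- what changed: B builds the adjacent-difference list once and judges it with whole-list predicates (any/all) instead of A's stateful single pass tracking previous level and previous direction.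
-- intended difference: On two-element reports with equal levels A returns True (its direction-consistency check only starts at the third element), while B returns False, the intended answer since a zero step means the levels are not strictly increasing or decreasing. — e.g. on check_level_increase([1, 1]): A returns true, B returns false
import Mathlib
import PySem

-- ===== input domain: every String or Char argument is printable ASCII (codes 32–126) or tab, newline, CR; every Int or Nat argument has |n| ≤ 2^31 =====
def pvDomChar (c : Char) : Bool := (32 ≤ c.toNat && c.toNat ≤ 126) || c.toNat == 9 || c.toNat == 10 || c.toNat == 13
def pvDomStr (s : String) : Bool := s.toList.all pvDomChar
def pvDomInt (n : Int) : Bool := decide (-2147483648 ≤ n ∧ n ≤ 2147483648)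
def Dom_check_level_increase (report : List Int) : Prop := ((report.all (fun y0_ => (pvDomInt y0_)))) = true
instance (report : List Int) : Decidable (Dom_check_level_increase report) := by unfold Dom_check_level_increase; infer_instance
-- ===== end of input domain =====

-- B replaces A's stateful single pass by an adjacent-difference list judged with whole-list
-- any/all predicates (simpler decomposition); on two-element equal-level reports A returns
-- True and B the intended False (see D_ below).


-- ===== PORT A =====
def check_direction (previous_level current_level : Int) : Int :=
  if previous_level - current_level = 0 then 0
  else if previous_level - current_level > 0 then -1
  else 1  -- Python's trailing 'if < 0' is exhaustive here

-- the for-loop of A with its two pieces of state (previous_level, previous_direction)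
def goA (prevL prevD : Option Int) (l : List Int) : Bool :=
  match l with
  | [] => true
  | current :: rest =>
    match prevL with
    | none => goA (some current) prevD rest
    | some p =>
      if 3 < (p - current).natAbs then false
      else
        let d := check_direction p current
        match prevD with
        | none => goA (some current) (some d) rest
        | some pd =>
          if d = 0 then false
          else if pd ≠ d then false
          else goA (some current) (some d) rest

def check_level_increase (report : List Int) : Bool := goA none none report

-- ===== PORT B =====
def check_level_increase_alt (report : List Int) : Bool :=
  let diffs := (report.zip (report.drop 1)).map (fun ab => ab.2 - ab.1)
  if diffs.any (fun d => 3 < d.natAbs) then false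
  else (diffs.all (fun d => 0 < d) || diffs.all (fun d => d < 0))

-- ===== PRECONDITION & SPEC =====
-- On two-element reports with equal levels A returns True (its direction-consistency check
-- only starts at the third element), while B returns False, the intended answer since a zero
-- step means the levels are not strictly increasing or decreasing.
def D_check_level_increase (report : List Int) : Prop :=
  report.length = 2 ∧ report.head? = report.getLast?
instance (report : List Int) : Decidable (D_check_level_increase report) := by
  unfold D_check_level_increase; infer_instance

def Spec_check_level_increase (report : List Int) (out : Bool) : Prop :=
  ¬ D_check_level_increase report → out = check_level_increase_alt report
instance (report : List Int) (out : Bool) : Decidable (Spec_check_level_increase report out) := by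
  unfold Spec_check_level_increase; infer_instance

def pvDiffWitness_check_level_increase : List Int := [1, 1]
def pvDiffWitnessOut_check_level_increase : Bool × Bool := (true, false)

-- ===== CLAIM (what is proved, stated in full; the proofs are below) =====
def Claim_unchanged_check_level_increase : Prop := ∀ (report : List Int), Dom_check_level_increase report → Spec_check_level_increase report (check_level_increase report)
def Claim_changed_check_level_increase : Prop := Dom_check_level_increase (pvDiffWitness_check_level_increase) ∧ D_check_level_increase (pvDiffWitness_check_level_increase) ∧ check_level_increase (pvDiffWitness_check_level_increase) = pvDiffWitnessOut_check_level_increase.1 ∧ check_level_increase_alt (pvDiffWitness_check_level_increase) = pvDiffWitnessOut_check_level_increase.2 ∧ pvDiffWitnessOut_check_level_increase.1 ≠ pvDiffWitnessOut_check_level_increase.2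
def Claim_exact_check_level_increase : Prop := ∀ (report : List Int), Dom_check_level_increase report → D_check_level_increase report → check_level_increase report ≠ check_level_increase_alt report

-- ===== LEMMAS AND PROOFS =====
-- the adjacent-difference list of B
def dl (l : List Int) : List Int := (l.zip (l.drop 1)).map (fun ab => ab.2 - ab.1)

theorem dl_cons2 (a b : Int) (r : List Int) : dl (a :: b :: r) = (b - a) :: dl (b :: r) := rfl

theorem alt_eq (l : List Int) :
    check_level_increase_alt l =
      if (dl l).any (fun d => 3 < d.natAbs) then false
      else ((dl l).all (fun d => 0 < d) || (dl l).all (fun d => d < 0)) := rfl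

-- A with previous_direction = 0 accepts only the empty remainder
theorem goA_zero (r : List Int) (p : Int) : goA (some p) (some 0) r = r.isEmpty := by
  cases r with
  | nil => rfl
  | cons c rest =>
    simp only [goA, check_direction, List.isEmpty_cons]
    split_ifs with h1 h2 h3 h4 <;> simp_all

-- A with previous_direction = 1 checks each difference for bound and positivity
theorem goA_pos (r : List Int) (p : Int) :
    goA (some p) (some 1) r
      = (dl (p :: r)).all (fun y => decide (y.natAbs ≤ 3) && decide (0 < y)) := by
  induction r generalizing p with
  | nil => rfl
  | cons c rest ih =>
    rw [dl_cons2]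
    simp only [goA, check_direction, List.all_cons]
    split_ifs with h1 h2 h3 h4 <;>
      simp_all <;> omega

-- A with previous_direction = -1 checks each difference for bound and negativity
theorem goA_neg (r : List Int) (p : Int) :
    goA (some p) (some (-1)) r
      = (dl (p :: r)).all (fun y => decide (y.natAbs ≤ 3) && decide (y < 0)) := by
  induction r generalizing p with
  | nil => rfl
  | cons c rest ih =>
    rw [dl_cons2]
    simp only [goA, check_direction, List.all_cons]
    split_ifs with h1 h2 h3 h4 <;>
      simp_all <;> omega

-- fusing B's abs filter into a single all
theorem ifany (m : List Int) (P : Int → Bool) :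
    (if m.any (fun d => 3 < d.natAbs) then false else m.all P)
      = m.all (fun y => decide (y.natAbs ≤ 3) && P y) := by
  induction m with
  | nil => simp
  | cons a m ih =>
    by_cases h : 3 < a.natAbs
    · simp [h, show ¬ a.natAbs ≤ 3 by omega]
    · cases hm : m.any (fun d => 3 < d.natAbs) <;>
        simp_all [show a.natAbs ≤ 3 by omega]

theorem check_level_increase_spec : Claim_unchanged_check_level_increase := by
  intro report _ hD
  match report with
  | [] => rfl
  | [a] => rfl
  | a :: b :: r =>
    show goA none none (a :: b :: r) = _
    rw [alt_eq, dl_cons2]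
    simp only [goA, check_direction]
    by_cases h1 : 3 < (a - b).natAbs
    · simp [h1, List.any_cons, show 3 < (b - a).natAbs by omega]
    · by_cases h2 : a - b = 0
      · -- equal first pair: A accepts only when r = [], which D_ excludes
        have hr : r ≠ [] := by
          intro hnil; subst hnil
          exact hD ⟨rfl, by simp [show b = a by omega]⟩
        rw [if_neg h1, if_pos h2, goA_zero]
        cases hany : ((b - a) :: dl (b :: r)).any (fun d => 3 < d.natAbs) <;>
          simp_all [show b - a = 0 by omega]
      · by_cases h3 : a - b > 0
        · -- strictly decreasing first pair
          rw [if_neg h1, if_neg h2, if_pos h3, goA_neg]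
          simp only [List.any_cons, List.all_cons,
            show (decide (3 < (b - a).natAbs) : Bool) = false by simp; omega,
            show (decide (b - a < 0) : Bool) = true by simp; omega,
            show (decide (0 < b - a) : Bool) = false by simp; omega,
            Bool.true_and, Bool.false_and, Bool.false_or]
          rw [ifany]
        · -- strictly increasing first pair
          rw [if_neg h1, if_neg h2, if_neg h3, goA_pos]
          simp only [List.any_cons, List.all_cons,
            show (decide (3 < (b - a).natAbs) : Bool) = false by simp; omega,
            show (decide (0 < b - a) : Bool) = true by simp; omega,
            show (decide (b - a < 0) : Bool) = false by simp; omega,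
            Bool.true_and, Bool.false_and, Bool.false_or, Bool.or_false]
          rw [ifany]

theorem check_level_increase_changed : Claim_changed_check_level_increase := by
  unfold Claim_changed_check_level_increase; decide

theorem check_level_increase_tight : Claim_exact_check_level_increase := by
  intro report _ hD
  obtain ⟨hlen, hh⟩ := hD
  match report, hlen with
  | [a, b], _ =>
    have hab : a = b := by simpa using hh
    subst hab
    simp [check_level_increase, goA, check_level_increase_alt]
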